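-- pv_equiv track=rewrite | github.com/riteme/toys | mips/single-cycle/asm.py | generate
-- ===== SOURCE A (Python) =====
-- def generate(li, mp):
--     tags = {}
--     for key, value in mp.items():
--         if value not in tags:
--             tags[value] = []
--         tags[value].append(key)
--
--     buf = []
--     for token, args, _, addr in li:
--         args = ', '.join(args)
--         line = '{:8} {}'.format(token, args)
--
--         if addr in tags:
--             comment = f'# {", ".join(tags[addr])}'
--             line = f'{line}  {comment}'
--
--         buf.append(line)
--
--     return buf
-- ===== SOURCE B (Python) =====
-- def generate(li, mp):
--     out = []
--     for token, args, _, addr in li: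
--         line = '{:8} {}'.format(token, ', '.join(args))
--         labels = [key for key, value in mp.items() if value == addr]
--         if labels:
--             line += '  # ' + ', '.join(labels)
--         out.append(line)
--     return out
-- ===== Notes on version B (the rewrite author's own statement) =====
-- stated objective: simpler
-- what changed: Dropped the inverted value->labels dict entirely: B scans mp inline per line with a comprehension and appends the comment when any label matches, instead of pre-grouping mp into a tags dict and doing membership + lookup.
import Mathlib
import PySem

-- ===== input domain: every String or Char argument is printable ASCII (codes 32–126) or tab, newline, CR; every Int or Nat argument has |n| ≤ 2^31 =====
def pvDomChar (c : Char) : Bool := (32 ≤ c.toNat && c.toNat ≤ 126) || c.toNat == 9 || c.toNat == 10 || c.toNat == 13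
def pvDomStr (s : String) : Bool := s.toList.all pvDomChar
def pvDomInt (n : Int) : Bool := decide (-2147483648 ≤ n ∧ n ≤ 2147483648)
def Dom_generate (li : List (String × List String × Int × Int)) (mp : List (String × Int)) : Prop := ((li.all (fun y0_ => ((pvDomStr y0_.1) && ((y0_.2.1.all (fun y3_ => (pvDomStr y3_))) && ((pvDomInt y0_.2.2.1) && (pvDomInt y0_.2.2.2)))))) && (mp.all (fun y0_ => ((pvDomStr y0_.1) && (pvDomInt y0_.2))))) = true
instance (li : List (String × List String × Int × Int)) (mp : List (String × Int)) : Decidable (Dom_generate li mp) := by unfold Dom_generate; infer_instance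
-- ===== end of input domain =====

-- B drops A's inverted value→labels dict and instead scans mp inline for each line (objective: simpler).

-- hand port of '{:8} {}'.format(token, ', '.join(args)): left-justify token with spaces to
-- width 8 (exact for any string: no pad once len(token) ≥ 8), one space, the joined args.
-- Shared by both ports (both Pythons format lines with this very expression).
def pvFmt (token : String) (args : List String) : List Char :=
  (token.toList ++ List.replicate (8 - token.toList.length) ' ') ++ [' ']
    ++ PySem.Chars.join (", ".toList) (args.map String.toList)

-- ===== PORT A =====
-- body of A's first loop: if value not in tags: tags[value] = [] ; tags[value].append(key)
def pvStep (d : PySem.Dict Int (List String)) (kv : String × Int) : PySem.Dict Int (List String) :=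
  (if d.contains kv.2 then d else d.insert kv.2 []).modify kv.2 [] (fun l => l ++ [kv.1])

def generate (li : List (String × List String × Int × Int)) (mp : List (String × Int)) : List String :=
  let tags := mp.foldl pvStep PySem.Dict.empty
  li.foldl (fun buf x =>
    let line := pvFmt x.1 x.2.1
    let line := if tags.contains x.2.2.2 then
        line ++ "  # ".toList
          ++ PySem.Chars.join (", ".toList) ((tags.getD x.2.2.2 []).map String.toList)
      else line
    buf ++ [String.ofList line]) []

-- ===== PORT B =====
def generate_alt (li : List (String × List String × Int × Int)) (mp : List (String × Int)) : List String :=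
  li.map (fun x =>
    let line := pvFmt x.1 x.2.1
    let labels := (mp.filter (fun kv => kv.2 == x.2.2.2)).map (fun kv => kv.1)
    if labels.isEmpty then String.ofList line
    else String.ofList (line ++ "  # ".toList
      ++ PySem.Chars.join (", ".toList) (labels.map String.toList)))

-- ===== PRECONDITION & SPEC =====
def Spec_generate (li : List (String × List String × Int × Int)) (mp : List (String × Int)) (out : List String) : Prop := out = generate_alt li mp
instance (li : List (String × List String × Int × Int)) (mp : List (String × Int)) (out : List String) : Decidable (Spec_generate li mp out) := by unfold Spec_generate; infer_instance

-- ===== CLAIM (what is proved, stated in full; the proofs are below) =====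
def Claim_equal_generate : Prop := ∀ (li : List (String × List String × Int × Int)) (mp : List (String × Int)), Dom_generate li mp → Spec_generate li mp (generate li mp)

-- ===== LEMMAS AND PROOFS =====

theorem pvStep_getD (d : PySem.Dict Int (List String)) (kv : String × Int) (x : Int) :
    (pvStep d kv).getD x [] = if x = kv.2 then d.getD kv.2 [] ++ [kv.1] else d.getD x [] := by
  unfold pvStep
  by_cases h : d.contains kv.2 = true
  · simp [h, PySem.Dict.getD_modify]
  · simp only [Bool.not_eq_true] at h
    simp [h, PySem.Dict.getD_modify, PySem.Dict.getD_insert,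
      PySem.Dict.getD_of_not_contains (h := h)]
    split_ifs <;> rfl

theorem pvStep_contains (d : PySem.Dict Int (List String)) (kv : String × Int) (x : Int) :
    (pvStep d kv).contains x = (x == kv.2 || d.contains x) := by
  unfold pvStep
  by_cases h : d.contains kv.2 = true
  · simp [h, PySem.Dict.contains_modify]
  · simp only [Bool.not_eq_true] at h
    simp [h, PySem.Dict.contains_modify, PySem.Dict.contains_insert]

theorem pvFold_getD (mp : List (String × Int)) (d : PySem.Dict Int (List String)) (x : Int) :
    (mp.foldl pvStep d).getD x [] = d.getD x [] ++ (mp.filter (fun kv => kv.2 == x)).map (fun kv => kv.1) := by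
  induction mp generalizing d with
  | nil => simp
  | cons kv t ih =>
    simp only [List.foldl_cons, ih, pvStep_getD, List.filter_cons]
    by_cases h : x = kv.2
    · simp [h]
    · simp [h, Ne.symm h]

theorem pvFold_contains (mp : List (String × Int)) (d : PySem.Dict Int (List String)) (x : Int) :
    (mp.foldl pvStep d).contains x = (d.contains x || mp.any (fun kv => kv.2 == x)) := by
  induction mp generalizing d with
  | nil => simp
  | cons kv t ih =>
    simp only [List.foldl_cons, ih, pvStep_contains, List.any_cons]
    by_cases h : x = kv.2
    · subst h; simp [Bool.or_comm]
    · have h1 : (x == kv.2) = false := by simpa using h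
      have h2 : (kv.2 == x) = false := by simpa using fun e => h e.symm
      simp [h1, h2]

-- ===== VERDICT (by name: the statement is the Claim_ definition above) =====
theorem generate_spec : Claim_equal_generate := by
  intro li mp _
  unfold Spec_generate generate generate_alt
  rw [PySem.List.foldl_append_singleton_eq_map, List.nil_append]
  refine List.map_congr_left (fun x _ => ?_)
  simp only [pvFold_contains, pvFold_getD, PySem.Dict.contains_empty, PySem.Dict.getD_empty,
    Bool.false_or, List.nil_append]
  by_cases h : mp.any (fun kv => kv.2 == x.2.2.2) = true
  · have hne : ((mp.filter (fun kv => kv.2 == x.2.2.2)).map (fun kv => kv.1)).isEmpty = false := by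
      obtain ⟨kv, hkv, hp⟩ := List.any_eq_true.mp h
      simp only [List.isEmpty_eq_false_iff, Ne, List.map_eq_nil_iff, List.filter_eq_nil_iff]
      intro hall; exact absurd hp (by simpa using hall kv hkv)
    simp [h, hne]
  · have he : ((mp.filter (fun kv => kv.2 == x.2.2.2)).map (fun kv => kv.1)).isEmpty = true := by
      simp only [Bool.not_eq_true, List.any_eq_false] at h
      simp only [List.isEmpty_iff, List.map_eq_nil_iff, List.filter_eq_nil_iff]
      intro kv hkv; simpa using h kv hkv
    simp [h, he]
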